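-- pv_equiv track=rewrite | github.com/AnasImloul/Leetcode-Solutions | scripts/algorithms/T/Two Out of Three/Two Out of Three.py | twoOutOfThree
-- ===== SOURCE A (Python) =====
-- from typing import List
--
-- def twoOutOfThree(nums1: List[int], nums2: List[int], nums3: List[int]) -> List[int]:
--     output = []
--     for i in nums1:
--         if i in nums2 or i in nums3:
--             if i not in output:
--                 output.append(i)
--     for j in nums2:
--         if j in nums3 or j in nums1:
--             if j not in output:
--                 output.append(j)
--     return output
-- ===== SOURCE B (Python) =====
-- def twoOutOfThree(nums1, nums2, nums3):
--     s1, s2, s3 = set(nums1), set(nums2), set(nums3)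
--     qualifying = (s1 & s2) | (s1 & s3) | (s2 & s3)
--     first_pos = {}
--     for idx, x in enumerate(nums1 + nums2):
--         if x not in first_pos:
--             first_pos[x] = idx
--     return sorted(qualifying, key=lambda x: first_pos[x])
-- ===== Notes on version B (the rewrite author's own statement) =====
-- stated objective: faster
-- what changed: Replaces A's two quadratic membership-scanning emission loops by set algebra ((s1&s2)|(s1&s3)|(s2&s3)) for the qualifying elements plus a first-occurrence-index dictionary over nums1+nums2, emitting the result by sorting the qualifying set on that index instead of scanning.
import Mathlib
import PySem

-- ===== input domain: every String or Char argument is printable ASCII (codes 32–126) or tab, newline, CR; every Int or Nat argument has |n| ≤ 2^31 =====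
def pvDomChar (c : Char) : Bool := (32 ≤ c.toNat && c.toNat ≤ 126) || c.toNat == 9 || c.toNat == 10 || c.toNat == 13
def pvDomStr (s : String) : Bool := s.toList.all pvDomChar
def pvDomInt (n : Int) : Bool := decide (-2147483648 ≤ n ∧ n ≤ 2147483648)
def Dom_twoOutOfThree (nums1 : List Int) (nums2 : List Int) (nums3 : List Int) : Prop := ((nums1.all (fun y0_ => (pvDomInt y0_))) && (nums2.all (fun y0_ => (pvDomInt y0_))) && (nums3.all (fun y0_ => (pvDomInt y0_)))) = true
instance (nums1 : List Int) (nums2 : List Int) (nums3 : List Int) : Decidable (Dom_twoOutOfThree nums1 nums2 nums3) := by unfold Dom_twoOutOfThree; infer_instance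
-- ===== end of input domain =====

-- B replaces A's quadratic emission scans by set algebra plus a sort of the qualifying
-- set by a precomputed first-occurrence-index dictionary (objective: faster).

-- ===== PORT A =====
def twoOutOfThree (nums1 : List Int) (nums2 : List Int) (nums3 : List Int) : List Int :=
  let out1 := nums1.foldl (fun output i =>
    if nums2.contains i || nums3.contains i then
      if !(output.contains i) then output ++ [i] else output
    else output) []
  nums2.foldl (fun output j =>
    if nums3.contains j || nums1.contains j then
      if !(output.contains j) then output ++ [j] else output
    else output) out1

-- ===== PORT B =====
-- sorted(qualifying, key=...) is deterministic despite set iteration order: the key is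
-- injective on the set (distinct first positions). first_pos[x] is ported as getD x 0:
-- exact, since every qualifying element occurs in nums1 ++ nums2, so the key is present.
def twoOutOfThree_alt (nums1 : List Int) (nums2 : List Int) (nums3 : List Int) : List Int :=
  let s1 : PySem.Set Int := PySem.Set.ofList nums1
  let s2 : PySem.Set Int := PySem.Set.ofList nums2
  let s3 : PySem.Set Int := PySem.Set.ofList nums3
  let qualifying : PySem.Set Int :=
    PySem.Set.union (PySem.Set.union (PySem.Set.inter s1 s2) (PySem.Set.inter s1 s3))
      (PySem.Set.inter s2 s3)
  let firstPos : PySem.Dict Int Int :=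
    (PySem.List.enumerate (nums1 ++ nums2)).foldl
      (fun d p => if d.contains p.2 then d else d.insert p.2 p.1) PySem.Dict.empty
  PySem.List.sorted qualifying (fun x => firstPos.getD x 0) false

-- ===== PRECONDITION & SPEC =====
def Spec_twoOutOfThree (nums1 : List Int) (nums2 : List Int) (nums3 : List Int) (out : List Int) : Prop := out = twoOutOfThree_alt nums1 nums2 nums3
instance (nums1 : List Int) (nums2 : List Int) (nums3 : List Int) (out : List Int) : Decidable (Spec_twoOutOfThree nums1 nums2 nums3 out) := by unfold Spec_twoOutOfThree; infer_instance

-- ===== CLAIM (what is proved, stated in full; the proofs are below) =====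
def Claim_equal_twoOutOfThree : Prop := ∀ (nums1 : List Int) (nums2 : List Int) (nums3 : List Int), Dom_twoOutOfThree nums1 nums2 nums3 → Spec_twoOutOfThree nums1 nums2 nums3 (twoOutOfThree nums1 nums2 nums3)

-- ===== LEMMAS AND PROOFS =====

-- Abbreviation for A's dedup-append emission step, parametrised by the test.
def pvStep (p : Int → Bool) : List Int → Int → List Int := fun output x =>
  if p x then
    if !(output.contains x) then output ++ [x] else output
  else output

-- B's qualifying set.
def pvQual (nums1 nums2 nums3 : List Int) : PySem.Set Int :=
  PySem.Set.union (PySem.Set.union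
    (PySem.Set.inter (PySem.Set.ofList nums1) (PySem.Set.ofList nums2))
    (PySem.Set.inter (PySem.Set.ofList nums1) (PySem.Set.ofList nums3)))
    (PySem.Set.inter (PySem.Set.ofList nums2) (PySem.Set.ofList nums3))

lemma pvMemQual (nums1 nums2 nums3 : List Int) (x : Int) :
    x ∈ pvQual nums1 nums2 nums3 ↔
      (x ∈ nums1 ∧ x ∈ nums2) ∨ (x ∈ nums1 ∧ x ∈ nums3) ∨ (x ∈ nums2 ∧ x ∈ nums3) := by
  simp only [pvQual, PySem.Set.mem_union, PySem.Set.mem_inter, PySem.Set.mem_ofList]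
  tauto

-- On elements of nums1, membership in B's qualifying set coincides with A's first test.
lemma pvCond1 (nums1 nums2 nums3 : List Int) (x : Int) (hx : x ∈ nums1) :
    (pvQual nums1 nums2 nums3).contains x = (nums2.contains x || nums3.contains x) := by
  rw [Bool.eq_iff_iff]
  simp only [PySem.Set.contains_eq_listContains, List.contains_eq_mem, Bool.or_eq_true,
    decide_eq_true_eq, pvMemQual]
  tauto

-- On elements of nums2, membership in B's qualifying set coincides with A's second test.
lemma pvCond2 (nums1 nums2 nums3 : List Int) (x : Int) (hx : x ∈ nums2) :
    (pvQual nums1 nums2 nums3).contains x = (nums3.contains x || nums1.contains x) := by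
  rw [Bool.eq_iff_iff]
  simp only [PySem.Set.contains_eq_listContains, List.contains_eq_mem, Bool.or_eq_true,
    decide_eq_true_eq, pvMemQual]
  tauto

-- Invariant of A's (merged) emission fold, by reverse induction on the scanned list:
-- output is nodup, holds exactly the p-elements of l, in strictly increasing
-- first-occurrence order.
lemma pvFoldInv (p : Int → Bool) (l : List Int) :
    (l.foldl (pvStep p) []).Nodup ∧
    (∀ x, x ∈ l.foldl (pvStep p) [] ↔ x ∈ l ∧ p x = true) ∧
    (l.foldl (pvStep p) []).Pairwise (fun a b => l.idxOf a < l.idxOf b) := by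
  induction l using List.reverseRecOn with
  | nil => simp
  | append_singleton l x ih =>
    obtain ⟨hnd, hmem, hpw⟩ := ih
    rw [List.foldl_append, List.foldl_cons, List.foldl_nil]
    set o := l.foldl (pvStep p) [] with ho
    have hpair' : o.Pairwise (fun a b => (l ++ [x]).idxOf a < (l ++ [x]).idxOf b) := by
      refine hpw.imp_of_mem ?_
      intro a b ha hb hab
      rw [List.idxOf_append_of_mem ((hmem a).1 ha).1,
        List.idxOf_append_of_mem ((hmem b).1 hb).1]
      exact hab
    by_cases hpx : p x = true
    · by_cases hox : x ∈ o
      · have hstep : pvStep p o x = o := by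
          simp [pvStep, hpx, List.contains_eq_mem, hox]
        rw [hstep]
        refine ⟨hnd, ?_, hpair'⟩
        intro a
        rw [hmem a]
        constructor
        · rintro ⟨h1, h2⟩; exact ⟨List.mem_append_left _ h1, h2⟩
        · rintro ⟨h1, h2⟩
          rcases List.mem_append.1 h1 with h | h
          · exact ⟨h, h2⟩
          · rw [List.mem_singleton] at h; subst h
            exact ⟨((hmem a).1 hox).1, h2⟩
      · have hxl : x ∉ l := fun hxl => hox ((hmem x).2 ⟨hxl, hpx⟩)
        have hstep : pvStep p o x = o ++ [x] := by
          simp [pvStep, hpx, List.contains_eq_mem, hox]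
        rw [hstep]
        refine ⟨?_, ?_, ?_⟩
        · refine hnd.append (List.nodup_singleton x) ?_
          intro a ha hax
          rw [List.mem_singleton] at hax; subst hax; exact hox ha
        · intro a
          simp only [List.mem_append, List.mem_singleton, hmem a]
          constructor
          · rintro (⟨h1, h2⟩ | rfl)
            · exact ⟨Or.inl h1, h2⟩
            · exact ⟨Or.inr rfl, hpx⟩
          · rintro ⟨h1 | h1, h2⟩
            · exact Or.inl ⟨h1, h2⟩
            · exact Or.inr h1
        · rw [List.pairwise_append]
          refine ⟨hpair', List.pairwise_singleton _ _, ?_⟩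
          intro a ha b hb
          rw [List.mem_singleton] at hb; subst hb
          rw [List.idxOf_append_of_mem ((hmem a).1 ha).1, List.idxOf_append_of_notMem hxl]
          simp only [List.idxOf_cons_self, Nat.add_zero]
          exact List.idxOf_lt_length_of_mem ((hmem a).1 ha).1
    · have hstep : pvStep p o x = o := by simp [pvStep, hpx]
      rw [hstep]
      refine ⟨hnd, ?_, hpair'⟩
      intro a
      rw [hmem a]
      constructor
      · rintro ⟨h1, h2⟩; exact ⟨List.mem_append_left _ h1, h2⟩
      · rintro ⟨h1, h2⟩
        rcases List.mem_append.1 h1 with h | h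
        · exact ⟨h, h2⟩
        · rw [List.mem_singleton] at h; subst h
          exact absurd h2 hpx

-- Keys already present keep their value through the first-position fold.
lemma pvPosFrozen (l : List Int) : ∀ (s : Int) (d : PySem.Dict Int Int) (x : Int),
    d.contains x = true →
    ((PySem.List.enumerate l s).foldl
      (fun d q => if d.contains q.2 then d else d.insert q.2 q.1) d).getD x 0 = d.getD x 0 := by
  induction l with
  | nil => intro s d x _; rw [PySem.List.enumerate_nil, List.foldl_nil]
  | cons h t ih =>
    intro s d x hx
    rw [PySem.List.enumerate_cons, List.foldl_cons]
    by_cases hdh : d.contains h = true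
    · simp only [hdh, if_true]
      exact ih (s + 1) d x hx
    · have hne : x ≠ h := fun e => hdh (e ▸ hx)
      simp only [Bool.not_eq_true] at hdh
      simp only [hdh, Bool.false_eq_true, if_false]
      rw [ih (s + 1) _ x (by rw [PySem.Dict.contains_insert]; simp [hx]),
        PySem.Dict.getD_insert]
      simp [hne]

-- The first-position fold with start s and x unseen returns s + idxOf.
lemma pvPosMain (l : List Int) : ∀ (s : Int) (d : PySem.Dict Int Int) (x : Int),
    x ∈ l → d.contains x = false →
    ((PySem.List.enumerate l s).foldl
      (fun d q => if d.contains q.2 then d else d.insert q.2 q.1) d).getD x 0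
    = s + (l.idxOf x : Int) := by
  induction l with
  | nil => intro _ _ _ h; cases h
  | cons h t ih =>
    intro s d x hx hdx
    rw [PySem.List.enumerate_cons, List.foldl_cons]
    by_cases hhx : h = x
    · subst hhx
      simp only [hdx, Bool.false_eq_true, if_false]
      rw [pvPosFrozen t (s + 1) _ h (PySem.Dict.contains_insert_self _ _ _),
        PySem.Dict.getD_insert_self]
      simp
    · have hxt : x ∈ t := by
        rcases List.mem_cons.1 hx with h' | h'
        · exact absurd h'.symm hhx
        · exact h'
      by_cases hdh : d.contains h = true
      · simp only [hdh, if_true]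
        rw [ih (s + 1) d x hxt hdx, List.idxOf_cons_ne _ hhx]
        push_cast; ring
      · simp only [Bool.not_eq_true] at hdh
        simp only [hdh, Bool.false_eq_true, if_false]
        have hne : x ≠ h := fun e => hhx e.symm
        have hc : (d.insert h s).contains x = false := by
          rw [PySem.Dict.contains_insert, hdx]
          simp [hne]
        rw [ih (s + 1) _ x hxt hc, List.idxOf_cons_ne _ hhx]
        push_cast; ring

-- The first-position dictionary: on elements of l (started empty) it returns idxOf.
lemma pvPosGetD (l : List Int) (x : Int) (hx : x ∈ l) :
    ((PySem.List.enumerate l 0).foldl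
      (fun d p => if d.contains p.2 then d else d.insert p.2 p.1) PySem.Dict.empty).getD x 0
    = (l.idxOf x : Int) := by
  simpa using pvPosMain l 0 PySem.Dict.empty x hx (PySem.Dict.contains_empty x)

-- ===== VERDICT (by name: the statement is the Claim_ definition above) =====
-- The qualifying set has no duplicates.
lemma pvQualNodup (nums1 nums2 nums3 : List Int) : (pvQual nums1 nums2 nums3).Nodup :=
  PySem.Set.nodup_union _ _ (PySem.Set.nodup_union _ _
    (PySem.Set.nodup_inter _ _ (PySem.Set.nodup_ofList nums1)))

theorem twoOutOfThree_spec : Claim_equal_twoOutOfThree := by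
  intro nums1 nums2 nums3 _
  unfold Spec_twoOutOfThree twoOutOfThree
  set p : Int → Bool := fun x => (pvQual nums1 nums2 nums3).contains x with hp
  set l : List Int := nums1 ++ nums2 with hl
  have h1 : nums1.foldl (fun output i =>
      if nums2.contains i || nums3.contains i then
        if !(output.contains i) then output ++ [i] else output
      else output) [] = nums1.foldl (pvStep p) [] := by
    apply PySem.List.foldl_congr_mem
    intro acc x hx
    simp only [pvStep, hp, pvCond1 nums1 nums2 nums3 x hx]
  have h2 : nums2.foldl (fun output j =>
      if nums3.contains j || nums1.contains j then
        if !(output.contains j) then output ++ [j] else output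
      else output) (nums1.foldl (pvStep p) []) = l.foldl (pvStep p) [] := by
    rw [hl, List.foldl_append]
    apply PySem.List.foldl_congr_mem
    intro acc x hx
    simp only [pvStep, hp, pvCond2 nums1 nums2 nums3 x hx]
  rw [h1, h2]
  obtain ⟨hnd, hmem, hpw⟩ := pvFoldInv p l
  have hB : twoOutOfThree_alt nums1 nums2 nums3 =
      PySem.List.sorted (pvQual nums1 nums2 nums3)
        (fun x => ((PySem.List.enumerate l 0).foldl
          (fun d q => if d.contains q.2 then d else d.insert q.2 q.1)
          PySem.Dict.empty).getD x 0) false := rfl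
  rw [hB]
  refine (PySem.List.sorted_eq_of_perm_of_pairwise_lt _ _ _ ?_ ?_).symm
  · rw [List.perm_ext_iff_of_nodup hnd (pvQualNodup nums1 nums2 nums3)]
    intro a
    rw [hmem a]
    constructor
    · rintro ⟨-, hpa⟩
      have := (PySem.Set.contains_eq_listContains _ a).symm.trans hpa
      simpa [List.contains_eq_mem] using this
    · intro ha
      refine ⟨?_, ?_⟩
      · rcases (pvMemQual nums1 nums2 nums3 a).1 ha with ⟨h1, _⟩ | ⟨h1, _⟩ | ⟨h1, _⟩ <;>
          simp [hl, h1]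
      · simp only [hp, PySem.Set.contains_eq_listContains, List.contains_eq_mem,
          decide_eq_true_eq]
        exact ha
  · refine hpw.imp_of_mem ?_
    intro a b ha hb hab
    have hal : a ∈ l := ((hmem a).1 ha).1
    have hbl : b ∈ l := ((hmem b).1 hb).1
    rw [pvPosGetD l a hal, pvPosGetD l b hbl]
    exact_mod_cast hab
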